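-- pv_equiv track=rewrite | github.com/ShiroDevC/Old_Code | python/IndividualizedSpatialModels/ProgramFinal/spatial_reasoner/low_level_functions_param.py | dict_mins
-- ===== SOURCE A (Python) =====
-- def dict_mins(dict1):
--     """
--     Determines the minima of all coordinates. returns the minima for the 3
--     axes separately. Returns a tuple with min x, y and z
--     """
--     x_dim = []
--     y_dim = []
--     z_dim = []
--     for (i, j, k) in dict1.keys():
--         y_dim.append(j)
--         x_dim.append(i)
--         z_dim.append(k)
--     # add 1 to actually get the size of the model.
--     return tuple([min(x_dim), min(y_dim), min(z_dim)])
-- ===== SOURCE B (Python) =====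
-- def dict_mins(dict1):
--     """Single pass maintaining three running minima instead of building
--     three lists and calling min three times."""
--     it = iter(dict1.keys())
--     try:
--         (mx, my, mz) = next(it)
--     except StopIteration:
--         return min([])  # empty dict: same ValueError as A
--     for (i, j, k) in it:
--         if i < mx:
--             mx = i
--         if j < my:
--             my = j
--         if k < mz:
--             mz = k
--     return (mx, my, mz)
-- ===== Notes on version B (the rewrite author's own statement) =====
-- stated objective: alternative
-- what changed: B makes one pass over the keys maintaining three running minima, instead of materialising three coordinate lists and scanning each with min().
import Mathlib
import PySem

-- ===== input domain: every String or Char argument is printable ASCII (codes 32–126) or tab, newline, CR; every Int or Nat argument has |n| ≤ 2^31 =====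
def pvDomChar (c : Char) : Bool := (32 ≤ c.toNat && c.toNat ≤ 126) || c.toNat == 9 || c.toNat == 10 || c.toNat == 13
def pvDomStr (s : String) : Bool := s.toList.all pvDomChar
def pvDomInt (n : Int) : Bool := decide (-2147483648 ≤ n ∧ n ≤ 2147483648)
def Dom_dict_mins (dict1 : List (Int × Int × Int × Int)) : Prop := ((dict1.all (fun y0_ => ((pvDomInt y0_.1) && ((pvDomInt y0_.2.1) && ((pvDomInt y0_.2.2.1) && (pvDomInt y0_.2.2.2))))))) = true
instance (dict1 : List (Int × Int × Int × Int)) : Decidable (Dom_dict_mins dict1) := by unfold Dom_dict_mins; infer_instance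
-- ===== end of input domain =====

-- B: one pass with three running minima, instead of A's three lists and three min() scans.
-- Pre_ excludes the empty dict, where both A and B raise ValueError (min of an empty list).
-- ===== PORT A =====
def dict_mins (dict1 : List (Int × Int × Int × Int)) : Int × Int × Int :=
  let st := dict1.foldl
    (fun (acc : List Int × List Int × List Int) e =>
      (acc.1 ++ [e.1], acc.2.1 ++ [e.2.1], acc.2.2 ++ [e.2.2.1]))
    ([], [], [])
  -- min([]) raises ValueError in Python (none); excluded by Pre_, default 0 never claimed
  (((PySem.List.min? st.1 (fun y => y)).getD 0),
   ((PySem.List.min? st.2.1 (fun y => y)).getD 0),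
   ((PySem.List.min? st.2.2 (fun y => y)).getD 0))

-- ===== PORT B =====
def dict_mins_alt (dict1 : List (Int × Int × Int × Int)) : Int × Int × Int :=
  match dict1 with
  | [] => ((PySem.List.min? ([] : List Int) (fun y => y)).getD 0, 0, 0)  -- min([]) raises; outside Pre_
  | e :: rest =>
    rest.foldl
      (fun (m : Int × Int × Int) e =>
        (if e.1 < m.1 then e.1 else m.1,
         if e.2.1 < m.2.1 then e.2.1 else m.2.1,
         if e.2.2.1 < m.2.2 then e.2.2.1 else m.2.2))
      (e.1, e.2.1, e.2.2.1)

-- ===== PRECONDITION & SPEC =====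
-- Pre_: the dict is non-empty; on the empty dict A raises ValueError (min of empty list).
def Pre_dict_mins (dict1 : List (Int × Int × Int × Int)) : Prop := dict1 ≠ []
instance (dict1 : List (Int × Int × Int × Int)) : Decidable (Pre_dict_mins dict1) := by unfold Pre_dict_mins; infer_instance
def pvWitness_dict_mins : (List (Int × Int × Int × Int)) := [(1, 2, 3, 0), (-1, 5, 2, 7)]

-- ===== PRECONDITION & SPEC =====
def Spec_dict_mins (dict1 : List (Int × Int × Int × Int)) (out : Int × Int × Int) : Prop := out = dict_mins_alt dict1
instance (dict1 : List (Int × Int × Int × Int)) (out : Int × Int × Int) : Decidable (Spec_dict_mins dict1 out) := by unfold Spec_dict_mins; infer_instance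

-- ===== CLAIM (what is proved, stated in full; the proofs are below) =====
def Claim_equal_dict_mins : Prop := ∀ (dict1 : List (Int × Int × Int × Int)), Dom_dict_mins dict1 → Pre_dict_mins dict1 → Spec_dict_mins dict1 (dict_mins dict1)

-- ===== LEMMAS AND PROOFS =====

-- ===== VERDICT (by name: the statement is the Claim_ definition above) =====
-- A's three accumulated lists are the three coordinate projections.
lemma dict_mins_lists (dict1 : List (Int × Int × Int × Int)) :
    dict1.foldl
      (fun (acc : List Int × List Int × List Int) e =>
        (acc.1 ++ [e.1], acc.2.1 ++ [e.2.1], acc.2.2 ++ [e.2.2.1]))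
      ([], [], [])
    = (dict1.map (·.1), dict1.map (·.2.1), dict1.map (·.2.2.1)) := by
  suffices h : ∀ (acc : List Int × List Int × List Int),
      dict1.foldl
        (fun (acc : List Int × List Int × List Int) e =>
          (acc.1 ++ [e.1], acc.2.1 ++ [e.2.1], acc.2.2 ++ [e.2.2.1])) acc
      = (acc.1 ++ dict1.map (·.1), acc.2.1 ++ dict1.map (·.2.1), acc.2.2 ++ dict1.map (·.2.2.1)) by
    simpa using h ([], [], [])
  induction dict1 with
  | nil => intro acc; simp
  | cons e t ih => intro acc; simp [List.foldl_cons, ih]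

-- B's running-minimum fold is the componentwise min fold.
lemma alt_fold_min (rest : List (Int × Int × Int × Int)) (a b c : Int) :
    rest.foldl
      (fun (m : Int × Int × Int) e =>
        (if e.1 < m.1 then e.1 else m.1,
         if e.2.1 < m.2.1 then e.2.1 else m.2.1,
         if e.2.2.1 < m.2.2 then e.2.2.1 else m.2.2))
      (a, b, c)
    = ((rest.map (·.1)).foldl min a, (rest.map (·.2.1)).foldl min b,
       (rest.map (·.2.2.1)).foldl min c) := by
  have hmin : ∀ x y : Int, (if x < y then x else y) = min y x := by
    intro x y; rcases lt_or_ge x y with h | h <;> simp [min_def] <;> omega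
  induction rest generalizing a b c with
  | nil => rfl
  | cons e t ih =>
    simp only [List.foldl_cons, List.map_cons]
    rw [ih, hmin, hmin, hmin]

theorem dict_mins_spec : Claim_equal_dict_mins := by
  intro dict1 _ hpre
  unfold Spec_dict_mins dict_mins dict_mins_alt
  match dict1 with
  | [] => exact absurd rfl hpre
  | e :: rest =>
    simp only [dict_mins_lists, List.map_cons, PySem.List.min?_id_cons, Option.getD_some,
      alt_fold_min]
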